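-- pv_equiv track=rewrite | github.com/aklofas/kicad-happy-testharness | tools/spice_coverage.py | count_simulations
-- ===== SOURCE A (Python) =====
-- from collections import defaultdict
--
-- def count_simulations(spice_data):
--     """Count simulations per subcircuit_type and status from SPICE output."""
--     results = spice_data.get("simulation_results", [])
--     by_type = defaultdict(lambda: {"total": 0, "pass": 0, "warn": 0, "fail": 0, "skip": 0})
--     for sim in results:
--         stype = sim.get("subcircuit_type", "unknown")
--         status = sim.get("status", "unknown")
--         by_type[stype]["total"] += 1
--         if status in ("pass", "warn", "fail", "skip"):
--             by_type[stype][status] += 1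
--     return dict(by_type)
-- ===== SOURCE B (Python) =====
-- from collections import defaultdict, Counter
--
-- def count_simulations(spice_data):
--     """Count simulations per subcircuit_type and status from SPICE output."""
--     groups = defaultdict(list)
--     for sim in spice_data.get("simulation_results", []):
--         groups[sim.get("subcircuit_type", "unknown")].append(sim.get("status", "unknown"))
--     summary = {}
--     for stype, statuses in groups.items():
--         c = Counter(statuses)
--         summary[stype] = {"total": len(statuses), "pass": c["pass"],
--                           "warn": c["warn"], "fail": c["fail"], "skip": c["skip"]}
--     return summary
-- ===== Notes on version B (the rewrite author's own statement) =====
-- stated objective: alternative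
-- what changed: Replaces the single incremental pass that maintains per-type count dicts with a two-phase group-then-count shape: first group statuses per subcircuit_type into lists, then summarize each group with a Counter.
import Mathlib
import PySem

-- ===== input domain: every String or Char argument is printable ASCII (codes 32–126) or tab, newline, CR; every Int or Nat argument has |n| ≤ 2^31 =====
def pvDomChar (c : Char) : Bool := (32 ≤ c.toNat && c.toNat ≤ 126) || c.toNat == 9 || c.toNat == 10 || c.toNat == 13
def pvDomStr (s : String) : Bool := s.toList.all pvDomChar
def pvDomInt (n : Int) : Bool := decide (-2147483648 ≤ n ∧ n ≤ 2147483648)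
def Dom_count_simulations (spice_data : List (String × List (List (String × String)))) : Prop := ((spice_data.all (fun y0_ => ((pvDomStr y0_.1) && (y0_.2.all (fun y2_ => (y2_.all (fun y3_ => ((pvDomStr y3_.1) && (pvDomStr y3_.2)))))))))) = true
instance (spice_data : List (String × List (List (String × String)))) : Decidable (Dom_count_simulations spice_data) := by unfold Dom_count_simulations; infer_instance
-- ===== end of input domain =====

-- A and B differ only in shape: A keeps running per-type counters in one pass; B groups statuses per type, then counts each group.

-- ===== PORT A =====
-- defaultdict default: {"total": 0, "pass": 0, "warn": 0, "fail": 0, "skip": 0}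
def csDefault : PySem.Dict String Int :=
  PySem.Dict.mk [("total", 0), ("pass", 0), ("warn", 0), ("fail", 0), ("skip", 0)]

-- loop body of A: bump 'total' and (if recognised) the status counter of by_type[stype]
def csStepA (d : PySem.Dict String (PySem.Dict String Int)) (sim : List (String × String)) :
    PySem.Dict String (PySem.Dict String Int) :=
  let stype := (PySem.Dict.mk sim).getD "subcircuit_type" "unknown"
  let status := (PySem.Dict.mk sim).getD "status" "unknown"
  let cur := d.getD stype csDefault
  let cur := cur.insert "total" (cur.getD "total" 0 + 1)
  let cur := if status = "pass" ∨ status = "warn" ∨ status = "fail" ∨ status = "skip" then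
               cur.insert status (cur.getD status 0 + 1)
             else cur
  d.insert stype cur

def count_simulations (spice_data : List (String × List (List (String × String)))) :
    List (String × List (String × Int)) :=
  let results := (PySem.Dict.mk spice_data).getD "simulation_results" []
  ((results.foldl csStepA PySem.Dict.empty).items).map (fun p => (p.1, p.2.items))

-- ===== PORT B =====
-- grouping loop body of B: append this sim's status to its type's list
def csGroupStep (g : PySem.Dict String (List String)) (sim : List (String × String)) :
    PySem.Dict String (List String) :=
  let stype := (PySem.Dict.mk sim).getD "subcircuit_type" "unknown"
  let status := (PySem.Dict.mk sim).getD "status" "unknown"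
  g.insert stype (g.getD stype [] ++ [status])

-- B's per-group summary: len + Counter lookups
def csSummarize (sts : List String) : List (String × Int) :=
  let c := PySem.Dict.counter sts
  [("total", (sts.length : Int)), ("pass", c.getD "pass" 0), ("warn", c.getD "warn" 0),
   ("fail", c.getD "fail" 0), ("skip", c.getD "skip" 0)]

def count_simulations_alt (spice_data : List (String × List (List (String × String)))) :
    List (String × List (String × Int)) :=
  let results := (PySem.Dict.mk spice_data).getD "simulation_results" []
  ((results.foldl csGroupStep PySem.Dict.empty).items).map (fun p => (p.1, csSummarize p.2))

-- ===== PRECONDITION & SPEC =====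
def Spec_count_simulations (spice_data : List (String × List (List (String × String)))) (out : List (String × List (String × Int))) : Prop := out = count_simulations_alt spice_data
instance (spice_data : List (String × List (List (String × String)))) (out : List (String × List (String × Int))) : Decidable (Spec_count_simulations spice_data out) := by unfold Spec_count_simulations; infer_instance

-- ===== CLAIM (what is proved, stated in full; the proofs are below) =====
def Claim_equal_count_simulations : Prop := ∀ (spice_data : List (String × List (List (String × String)))), Dom_count_simulations spice_data → Spec_count_simulations spice_data (count_simulations spice_data)

-- ===== LEMMAS AND PROOFS =====

-- B's grouping state, viewed through A's eyes: each status list replaced by its summary dict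
def csView (g : PySem.Dict String (List String)) : PySem.Dict String (PySem.Dict String Int) :=
  PySem.Dict.mk (g.items.map (fun p => (p.1, PySem.Dict.mk (csSummarize p.2))))

theorem cs_get?_mapVal (its : List (String × List String))
    (f : List String → PySem.Dict String Int) (k : String) :
    (PySem.Dict.mk (its.map (fun p => (p.1, f p.2)))).get? k = ((PySem.Dict.mk its).get? k).map f := by
  induction its with
  | nil => simp [PySem.Dict.get?]
  | cons a t ih =>
      obtain ⟨ak, av⟩ := a
      by_cases h : (ak == k)
      · simp [PySem.Dict.get?_mk_cons, h]
      · simp [PySem.Dict.get?_mk_cons, h, ih]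

theorem cs_get?_view (g : PySem.Dict String (List String)) (k : String) :
    (csView g).get? k = (g.get? k).map (fun L => PySem.Dict.mk (csSummarize L)) := by
  obtain ⟨its⟩ := g
  unfold csView
  exact cs_get?_mapVal its (fun L => PySem.Dict.mk (csSummarize L)) k

theorem cs_view_contains (g : PySem.Dict String (List String)) (k : String) :
    (csView g).contains k = g.contains k := by
  rw [PySem.Dict.contains_eq_isSome_get?, PySem.Dict.contains_eq_isSome_get?, cs_get?_view]
  cases g.get? k <;> rfl

theorem cs_view_getD (g : PySem.Dict String (List String)) (k : String) :
    (csView g).getD k csDefault = PySem.Dict.mk (csSummarize (g.getD k [])) := by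
  have hd : csDefault = PySem.Dict.mk (csSummarize []) := by decide
  rw [hd, PySem.Dict.getD_eq_get?_getD, PySem.Dict.getD_eq_get?_getD, cs_get?_view]
  cases g.get? k <;> rfl

theorem cs_view_insert (g : PySem.Dict String (List String)) (k : String) (L : List String) :
    (csView g).insert k (PySem.Dict.mk (csSummarize L)) = csView (g.insert k L) := by
  apply PySem.Dict.ext
  show ((csView g).insert k (PySem.Dict.mk (csSummarize L))).items
      = ((g.insert k L).items).map (fun p => (p.1, PySem.Dict.mk (csSummarize p.2)))
  rw [PySem.Dict.items_insert, PySem.Dict.items_insert, cs_view_contains]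
  by_cases h : g.contains k
  · simp only [h, if_pos]
    show ((g.items.map _).map _) = _
    rw [List.map_map, List.map_map]
    apply List.map_congr_left
    intro p _
    by_cases hp : p.1 = k <;> simp [hp]
  · simp [csView, h]

theorem cs_inc (sts : List String) (status : String) :
    (let cur := PySem.Dict.mk (csSummarize sts)
     let cur := cur.insert "total" (cur.getD "total" 0 + 1)
     if status = "pass" ∨ status = "warn" ∨ status = "fail" ∨ status = "skip" then
       cur.insert status (cur.getD status 0 + 1)
     else cur) = PySem.Dict.mk (csSummarize (sts ++ [status])) := by
  by_cases h1 : status = "pass" <;> by_cases h2 : status = "warn" <;>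
    by_cases h3 : status = "fail" <;> by_cases h4 : status = "skip" <;>
  · first | subst h1 | subst h2 | subst h3 | subst h4 | skip
    apply PySem.Dict.ext
    simp only [csSummarize, PySem.Dict.getD_counter]
    simp_all [PySem.Dict.insert, PySem.Dict.getD, PySem.Dict.get?, PySem.Dict.contains,
          List.count_append]

theorem cs_step (g : PySem.Dict String (List String)) (sim : List (String × String)) :
    csStepA (csView g) sim = csView (csGroupStep g sim) := by
  unfold csStepA csGroupStep
  simp only [cs_view_getD, cs_inc, cs_view_insert]

theorem cs_fold (l : List (List (String × String))) (g : PySem.Dict String (List String)) :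
    l.foldl csStepA (csView g) = csView (l.foldl csGroupStep g) := by
  induction l generalizing g with
  | nil => rfl
  | cons sim l ih => simp [List.foldl, cs_step, ih]

-- ===== VERDICT (by name: the statement is the Claim_ definition above) =====
theorem count_simulations_spec : Claim_equal_count_simulations := by
  intro spice_data _
  unfold Spec_count_simulations count_simulations count_simulations_alt
  have h : (PySem.Dict.empty : PySem.Dict String (PySem.Dict String Int)) = csView PySem.Dict.empty := rfl
  rw [h]
  simp only [cs_fold]
  simp [csView, List.map_map, Function.comp]
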